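-- pv_equiv track=rewrite | github.com/DanielMagen/University-exercises | Into_to_CS_2017_2018/ex11/ex11_tester.py | legal_assignment_reduce
-- ===== SOURCE A (Python) =====
-- def legal_assignment_reduce(dic, i):
--     if dic[i] < i:
--         return False
--     for key in dic.keys():
--         if key == i:
--             continue
--         if dic[i] >= dic[key]:
--             return False
--     return True
-- ===== SOURCE B (Python) =====
-- def legal_assignment_reduce(dic, i):
--     val = dic[i]
--     if val < i:
--         return False
--     vals = list(dic.values())
--     m = min(vals)
--     return val == m and vals.count(m) == 1
-- ===== Notes on version B (the rewrite author's own statement) =====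
-- stated objective: simpler
-- what changed: B replaces A's early-exit scan over the keys (comparing dic[i] against every other value) with a value-level formulation: dic[i] is legal iff it equals min(dic.values()) and that minimum occurs exactly once.
import Mathlib
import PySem

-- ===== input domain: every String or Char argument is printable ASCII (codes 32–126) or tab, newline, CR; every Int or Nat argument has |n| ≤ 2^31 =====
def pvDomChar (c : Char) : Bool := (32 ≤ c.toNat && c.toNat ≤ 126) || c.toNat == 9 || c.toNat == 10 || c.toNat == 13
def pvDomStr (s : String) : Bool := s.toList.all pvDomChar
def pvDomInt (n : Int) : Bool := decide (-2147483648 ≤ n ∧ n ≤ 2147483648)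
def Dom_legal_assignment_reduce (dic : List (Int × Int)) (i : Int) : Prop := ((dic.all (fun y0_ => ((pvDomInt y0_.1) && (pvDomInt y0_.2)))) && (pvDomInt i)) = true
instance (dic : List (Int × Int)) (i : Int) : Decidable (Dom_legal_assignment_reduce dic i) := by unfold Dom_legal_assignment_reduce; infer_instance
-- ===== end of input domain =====

-- B checks "dic[i] is the unique minimum of the values" via min/count instead of A's early-exit key scan; simpler decomposition.

-- dict lookup, first match (dic[k])
def pvLookup : List (Int × Int) → Int → Option Int
  | [], _ => none
  | (k, w) :: rest, x => if k == x then some w else pvLookup rest x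

-- ===== PORT A =====
-- A's 'for key in dic.keys(): if key == i: continue; if dic[i] >= dic[key]: return False'
def pvLoopA (dic : List (Int × Int)) (vi i : Int) : List (Int × Int) → Bool
  | [] => true
  | (k, _) :: rest =>
    if k == i then pvLoopA dic vi i rest
    else if (pvLookup dic k).getD 0 ≤ vi then false
    else pvLoopA dic vi i rest

def legal_assignment_reduce (dic : List (Int × Int)) (i : Int) : Bool :=
  match pvLookup dic i with
  | none => false            -- KeyError: excluded by Pre_
  | some vi => if vi < i then false else pvLoopA dic vi i dic

-- ===== PORT B =====
def legal_assignment_reduce_alt (dic : List (Int × Int)) (i : Int) : Bool :=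
  match pvLookup dic i with
  | none => false            -- KeyError: excluded by Pre_
  | some v =>
    if v < i then false
    else
      let vals := dic.map Prod.snd
      match PySem.List.min? vals (fun x => x) with
      | none => false        -- unreachable: dic is nonempty when the lookup succeeded
      | some m => (v == m) && (PySem.List.count vals m == 1)

-- ===== PRECONDITION & SPEC =====
-- Pre_ excludes inputs where key i is absent (Python raises KeyError) and assoc lists with
-- duplicate keys, which do not denote a Python dict (a dict literal keeps only the last binding).
def Pre_legal_assignment_reduce (dic : List (Int × Int)) (i : Int) : Prop :=
  (dic.map Prod.fst).Nodup ∧ i ∈ dic.map Prod.fst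

instance (dic : List (Int × Int)) (i : Int) : Decidable (Pre_legal_assignment_reduce dic i) := by
  unfold Pre_legal_assignment_reduce; infer_instance

def pvWitness_legal_assignment_reduce : (List (Int × Int)) × Int := ([(0, 1), (2, 5)], 0)

def Spec_legal_assignment_reduce (dic : List (Int × Int)) (i : Int) (out : Bool) : Prop := out = legal_assignment_reduce_alt dic i
instance (dic : List (Int × Int)) (i : Int) (out : Bool) : Decidable (Spec_legal_assignment_reduce dic i out) := by unfold Spec_legal_assignment_reduce; infer_instance

-- ===== CLAIM (what is proved, stated in full; the proofs are below) =====
def Claim_equal_legal_assignment_reduce : Prop := ∀ (dic : List (Int × Int)) (i : Int), Dom_legal_assignment_reduce dic i → Pre_legal_assignment_reduce dic i → Spec_legal_assignment_reduce dic i (legal_assignment_reduce dic i)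

-- ===== LEMMAS AND PROOFS =====

theorem pvLookup_eq_of_mem {dic : List (Int × Int)} (hnd : (dic.map Prod.fst).Nodup)
    {k v : Int} (h : (k, v) ∈ dic) : pvLookup dic k = some v := by
  induction dic with
  | nil => cases h
  | cons p rest ih =>
    obtain ⟨pk, pv⟩ := p
    simp only [List.map_cons, List.nodup_cons, List.mem_map] at hnd
    rcases List.mem_cons.mp h with h1 | h1
    · cases h1; simp [pvLookup]
    · have hne : pk ≠ k := fun he => hnd.1 ⟨(k, v), h1, by simp [he]⟩
      simp [pvLookup, hne, ih hnd.2 h1]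

theorem pvLookup_mem {dic : List (Int × Int)} {k v : Int}
    (h : pvLookup dic k = some v) : (k, v) ∈ dic := by
  induction dic with
  | nil => simp [pvLookup] at h
  | cons p rest ih =>
    obtain ⟨pk, pv⟩ := p
    by_cases he : pk = k
    · subst he; simp [pvLookup] at h; simp [h]
    · simp [pvLookup, he] at h; exact List.mem_cons_of_mem _ (ih h)

theorem pvLookup_isSome_of_mem {dic : List (Int × Int)} {k : Int}
    (h : k ∈ dic.map Prod.fst) : ∃ v, pvLookup dic k = some v := by
  induction dic with
  | nil => simp at h
  | cons p rest ih =>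
    obtain ⟨pk, pv⟩ := p
    by_cases he : pk = k
    · exact ⟨pv, by simp [pvLookup, he]⟩
    · have h' : k ∈ rest.map Prod.fst := by
        simp only [List.map_cons, List.mem_cons] at h
        rcases h with h | h
        · exact absurd h.symm he
        · exact h
      obtain ⟨v, hv⟩ := ih h'
      exact ⟨v, by simp [pvLookup, he, hv]⟩

-- A's loop, characterised: true iff every non-i entry's value is strictly above vi
theorem pvLoopA_eq (dic : List (Int × Int)) (hnd : (dic.map Prod.fst).Nodup)
    (vi i : Int) (l : List (Int × Int)) (hl : ∀ p ∈ l, p ∈ dic) :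
    pvLoopA dic vi i l = l.all (fun p => p.1 == i || decide (vi < p.2)) := by
  induction l with
  | nil => rfl
  | cons p rest ih =>
    obtain ⟨k, w⟩ := p
    have hmem : (k, w) ∈ dic := hl _ (List.mem_cons_self)
    have hlk : pvLookup dic k = some w := pvLookup_eq_of_mem hnd hmem
    have ihr := ih (fun q hq => hl q (List.mem_cons_of_mem _ hq))
    by_cases he : k = i
    · simp [pvLoopA, he, ihr]
    · by_cases hle : w ≤ vi
      · simp [pvLoopA, he, hlk, hle, not_lt.mpr hle]
      · simp [pvLoopA, he, hlk, hle, not_le.mp hle, ihr]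

-- the key pair is unique under nodup keys
theorem pair_unique {dic : List (Int × Int)} (hnd : (dic.map Prod.fst).Nodup)
    {p q : Int × Int} (hp : p ∈ dic) (hq : q ∈ dic) (h : p.1 = q.1) : p = q := by
  have h1 := pvLookup_eq_of_mem hnd (show (p.1, p.2) ∈ dic by simpa using hp)
  have h2 := pvLookup_eq_of_mem hnd (show (q.1, q.2) ∈ dic by simpa using hq)
  rw [h] at h1; rw [h1] at h2
  exact Prod.ext h (by injection h2)

theorem count_eq_one_of_strict {dic : List (Int × Int)} {i v : Int}
    (hnd : (dic.map Prod.fst).Nodup) (hmem : (i, v) ∈ dic)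
    (hstrict : ∀ p ∈ dic, p.1 ≠ i → v < p.2) :
    (dic.map Prod.snd).count v = 1 := by
  induction dic with
  | nil => cases hmem
  | cons p rest ih =>
    obtain ⟨pk, pv⟩ := p
    simp only [List.map_cons, List.nodup_cons, List.mem_map] at hnd
    rcases List.mem_cons.mp hmem with h1 | h1
    · cases h1
      have : ∀ w ∈ rest.map Prod.snd, w ≠ v := by
        intro w hw
        obtain ⟨q, hq, rfl⟩ := List.mem_map.mp hw
        have hqi : q.1 ≠ i := fun he => hnd.1 ⟨q, hq, he⟩
        exact ne_of_gt (hstrict q (List.mem_cons_of_mem _ hq) hqi)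
      simp [List.count_eq_zero.mpr (fun h => this v h rfl)]
    · have hpk : pk ≠ i := by
        intro he; subst he
        exact hnd.1 ⟨(pk, v), h1, rfl⟩
      have hlt : v < pv := hstrict (pk, pv) List.mem_cons_self hpk
      have hne : pv ≠ v := ne_of_gt hlt
      have := ih hnd.2 h1 (fun q hq hqi => hstrict q (List.mem_cons_of_mem _ hq) hqi)
      simp [hne, this]

theorem two_le_count_of_pair {dic : List (Int × Int)} {p q : Int × Int} {v : Int}
    (hp : p ∈ dic) (hq : q ∈ dic) (hne : p ≠ q) (hpv : p.2 = v) (hqv : q.2 = v) :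
    2 ≤ (dic.map Prod.snd).count v := by
  obtain ⟨l1, l2, rfl⟩ := List.append_of_mem hp
  have hq' : q ∈ l1 ++ l2 := by
    rcases List.mem_append.mp hq with h | h
    · exact List.mem_append_left _ h
    · rcases List.mem_cons.mp h with h | h
      · exact absurd h.symm hne
      · exact List.mem_append_right _ h
  have h1 : 1 ≤ ((l1 ++ l2).map Prod.snd).count v :=
    List.one_le_count_iff.mpr (List.mem_map.mpr ⟨q, hq', hqv⟩)
  have : (((l1 ++ (p :: l2)).map Prod.snd).count v)
      = ((l1.map Prod.snd).count v) + ((l2.map Prod.snd).count v) + 1 := by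
    simp [List.count_append, hpv]
    omega
  have h2 : ((l1 ++ l2).map Prod.snd).count v
      = (l1.map Prod.snd).count v + (l2.map Prod.snd).count v := by
    simp [List.count_append]
  omega

-- core equivalence of the two bodies, once dic[i] = v is known
theorem core_eq {dic : List (Int × Int)} {i v m : Int}
    (hnd : (dic.map Prod.fst).Nodup) (hmem : (i, v) ∈ dic)
    (hm : PySem.List.min? (dic.map Prod.snd) (fun x => x) = some m) :
    dic.all (fun p => p.1 == i || decide (v < p.2))
      = ((v == m) && (PySem.List.count (dic.map Prod.snd) m == 1)) := by
  have hmin : ∀ y ∈ dic.map Prod.snd, m ≤ y := fun y hy =>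
    PySem.List.min?_isMin hm y hy
  have hmmem : m ∈ dic.map Prod.snd := PySem.List.min?_mem hm
  by_cases hP : ∀ p ∈ dic, p.1 ≠ i → v < p.2
  · -- A-side true
    have hA : dic.all (fun p => p.1 == i || decide (v < p.2)) = true := by
      simp only [List.all_eq_true]
      intro p hp
      by_cases he : p.1 = i
      · simp [he]
      · simp [hP p hp he]
    -- m = v
    have hmv : m = v := by
      have hle : m ≤ v := hmin v (List.mem_map.mpr ⟨(i, v), hmem, rfl⟩)
      obtain ⟨q, hq, hqv⟩ := List.mem_map.mp hmmem
      by_cases he : q.1 = i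
      · have := pair_unique hnd hq hmem he
        rw [this] at hqv; omega
      · have := hP q hq he
        omega
    have hcount : (dic.map Prod.snd).count v = 1 :=
      count_eq_one_of_strict hnd hmem hP
    rw [hA, hmv]
    simp [PySem.List.count_eq, hcount]
  · -- A-side false
    rw [not_forall] at hP
    simp only [not_forall, _root_.not_imp, not_lt] at hP
    obtain ⟨q, hq, hqi, hqle⟩ := hP
    have hA : dic.all (fun p => p.1 == i || decide (v < p.2)) = false := by
      simp only [List.all_eq_false]
      exact ⟨q, hq, by simp [hqi, not_lt.mpr hqle]⟩
    rw [hA]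
    by_cases hmv : v = m
    · -- then q.2 = m too, so the count is ≥ 2
      have hq2 : q.2 = m := by
        have h1 : m ≤ q.2 := hmin q.2 (List.mem_map.mpr ⟨q, hq, rfl⟩)
        omega
      have hne : (i, v) ≠ q := fun he => hqi (by rw [← he])
      have h2 : 2 ≤ (dic.map Prod.snd).count m :=
        two_le_count_of_pair hmem hq hne (by simpa using hmv) hq2
      have hcne : List.count m (dic.map Prod.snd) ≠ 1 := by omega
      simp [PySem.List.count_eq, hcne]
    · simp [hmv]

-- ===== VERDICT (by name: the statement is the Claim_ definition above) =====
theorem legal_assignment_reduce_spec : Claim_equal_legal_assignment_reduce := by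
  intro dic i _ hpre
  obtain ⟨hnd, hkey⟩ := hpre
  obtain ⟨v, hv⟩ := pvLookup_isSome_of_mem hkey
  have hmem : (i, v) ∈ dic := pvLookup_mem hv
  unfold Spec_legal_assignment_reduce legal_assignment_reduce legal_assignment_reduce_alt
  rw [hv]
  by_cases hlt : v < i
  · simp [hlt]
  · simp only [hlt, if_false]
    have hne : dic.map Prod.snd ≠ [] := by
      intro h
      have : dic = [] := by
        cases dic with
        | nil => rfl
        | cons p r => simp at h
      subst this; cases hmem
    obtain ⟨m, hm⟩ : ∃ m, PySem.List.min? (dic.map Prod.snd) (fun x => x) = some m := by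
      cases h : PySem.List.min? (dic.map Prod.snd) (fun x => x) with
      | none => exact absurd ((PySem.List.min?_eq_none_iff _ _).mp h) hne
      | some m => exact ⟨m, rfl⟩
    rw [hm]
    exact (pvLoopA_eq dic hnd v i dic (fun p hp => hp)).trans (core_eq hnd hmem hm)
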